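-- pv_equiv track=rewrite | github.com/ankitasumeet17/CS303E | workspace.py | stringWithStars
-- ===== SOURCE A (Python) =====
-- def stringWithStars(string):
--     lastStr = string[-1]
--
--     if not string:
--         return 0
--     elif string[0] == lastStr:
--         return str(string[0])
--     else:
--         return string[0] + '*' + stringWithStars(string[1:])
-- ===== SOURCE B (Python) =====
-- def stringWithStars(string):
--     idx = string.index(string[-1])
--     return '*'.join(string[:idx + 1])
-- ===== Notes on version B (the rewrite author's own statement) =====
-- stated objective: simpler
-- what changed: Replaces A's recursive scan-and-concatenate with a locate-then-build decomposition: find the first index of the last character with str.index, then join the prefix with star separators; the dead zero-returning branch disappears.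
import Mathlib
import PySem

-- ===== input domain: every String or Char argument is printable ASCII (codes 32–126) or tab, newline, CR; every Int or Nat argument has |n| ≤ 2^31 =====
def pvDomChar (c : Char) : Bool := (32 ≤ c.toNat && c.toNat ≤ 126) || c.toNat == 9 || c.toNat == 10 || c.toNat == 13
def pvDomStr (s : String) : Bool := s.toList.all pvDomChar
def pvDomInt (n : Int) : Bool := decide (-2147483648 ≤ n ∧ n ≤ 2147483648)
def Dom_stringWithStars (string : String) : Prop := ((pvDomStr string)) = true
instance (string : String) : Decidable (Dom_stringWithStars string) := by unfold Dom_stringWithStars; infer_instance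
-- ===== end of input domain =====

-- B replaces A's recursive scan-and-concatenate with locate-the-last-char-then-join (simpler decomposition).

-- ===== PORT A =====
-- A's recursion over the string, on its character list; string[-1] via pyGet?
-- (none = IndexError, excluded by Pre_; the 'return 0' branch of A is unreachable).
def stringWithStarsGo (l : List Char) : List Char :=
  match PySem.List.pyGet? l (-1) with
  | none => []          -- IndexError on the empty string (outside Pre_)
  | some lastC =>
    match l with
    | [] => []          -- A's dead early-return branch (unreachable: pyGet? already raised)
    | c :: rest => if c = lastC then [c] else c :: '*' :: stringWithStarsGo rest
termination_by l.length
decreasing_by simp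

def stringWithStars (string : String) : String := String.mk (stringWithStarsGo string.toList)

-- ===== PORT B =====
-- locate the first occurrence of the last character, then join that prefix with star separators
def stringWithStars_alt (string : String) : String :=
  match PySem.List.pyGet? string.toList (-1) with
  | none => ""          -- IndexError on the empty string (outside Pre_)
  | some lastC =>
    match PySem.List.index? string.toList lastC with
    | none => ""        -- unreachable: lastC is in the string
    | some idx => String.mk (List.intersperse '*' (string.toList.take (idx + 1)))

-- ===== PRECONDITION & SPEC =====
-- A evaluates string[-1] first and raises IndexError on the empty string; Pre_ excludes exactly that.
def Pre_stringWithStars (string : String) : Prop := string ≠ ""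
instance (string : String) : Decidable (Pre_stringWithStars string) := by unfold Pre_stringWithStars; infer_instance
def pvWitness_stringWithStars : String := "abca"

def Spec_stringWithStars (string : String) (out : String) : Prop := out = stringWithStars_alt string
instance (string : String) (out : String) : Decidable (Spec_stringWithStars string out) := by unfold Spec_stringWithStars; infer_instance

-- ===== CLAIM (what is proved, stated in full; the proofs are below) =====
def Claim_equal_stringWithStars : Prop := ∀ (string : String), Dom_stringWithStars string → Pre_stringWithStars string → Spec_stringWithStars string (stringWithStars string)

-- ===== LEMMAS AND PROOFS =====

lemma go_eq_intersperse : ∀ (l : List Char) (hne : l ≠ []) (k : Nat),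
    PySem.List.index? l (l.getLast hne) = some k →
    stringWithStarsGo l = List.intersperse '*' (l.take (k + 1)) := by
  intro l
  induction l with
  | nil => intro h; exact absurd rfl h
  | cons c rest ih =>
    intro hne k hidx
    rw [stringWithStarsGo.eq_def]
    rw [PySem.List.pyGet?_neg_one]
    have hlast : (c :: rest).getLast? = some ((c :: rest).getLast hne) :=
      List.getLast?_eq_some_getLast (l := c :: rest) hne
    rw [hlast]
    by_cases hc : c = (c :: rest).getLast hne
    · simp only [if_pos hc]
      have : PySem.List.index? (c :: rest) ((c :: rest).getLast hne) = some 0 := by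
        rw [← hc]; exact PySem.List.index?_cons_self (x := c) (xs := rest)
      rw [this] at hidx
      injection hidx with hk
      subst hk
      simp
    · simp only [if_neg hc]
      have hrest : rest ≠ [] := by
        intro h; subst h; simp [List.getLast] at hc
      have hlr : (c :: rest).getLast hne = rest.getLast hrest := List.getLast_cons hrest
      rw [hlr] at hidx hc
      rw [PySem.List.index?_cons_of_ne _ hc] at hidx
      obtain ⟨k', hk', hkk⟩ := Option.map_eq_some_iff.mp hidx
      subst hkk
      have hih := ih hrest k' hk'
      rw [hih]
      obtain ⟨r, rs, rfl⟩ := List.exists_cons_of_ne_nil hrest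
      simp [List.take_succ_cons]

theorem stringWithStars_spec : Claim_equal_stringWithStars := by
  intro s _ hpre
  unfold Spec_stringWithStars stringWithStars stringWithStars_alt
  have hl : s.toList ≠ [] := by
    intro h
    apply hpre
    rwa [String.toList_eq_nil_iff] at h
  rw [PySem.List.pyGet?_neg_one, List.getLast?_eq_some_getLast hl]
  have hmem : s.toList.getLast hl ∈ s.toList := List.getLast_mem hl
  have hne : PySem.List.index? s.toList (s.toList.getLast hl) ≠ none := by
    intro h
    rw [PySem.List.index?_eq_none_iff] at h
    exact h hmem
  obtain ⟨k, hk⟩ := Option.ne_none_iff_exists'.mp hne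
  rw [go_eq_intersperse s.toList hl k hk]
  simp only [hk]
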